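-- pv_equiv track=rewrite | github.com/noritakaIzumi/atcoder-python | agc013/a/main.py | solve
-- ===== SOURCE A (Python) =====
-- def solve(n: int, a: list) -> int:
--     if n == 1:
--         return 1
--     result = 1
--     mode = 0  # 増加: 1, 減少: -1
--     i = 1
--     while i < n:
--         if a[i - 1] < a[i]:
--             if mode < 0:
--                 result += 1
--                 mode = 0
--             else:
--                 mode = 1
--         elif a[i - 1] > a[i]:
--             if mode > 0:
--                 result += 1
--                 mode = 0
--             else:
--                 mode = -1
--         i += 1
--
--     return result
-- ===== SOURCE B (Python) =====
-- def solve(n: int, a: list) -> int: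
--     # Outer do-while over segments (every sequence, even an empty one, has one
--     # segment); inner loop extends the current segment while it stays monotone.
--     result = 0
--     i = 0
--     while True:
--         result += 1
--         d = 0
--         j = i
--         while j + 1 < n:
--             x, y = a[j], a[j + 1]
--             if d == 0:
--                 if x < y:
--                     d = 1
--                 elif x > y:
--                     d = -1
--                 j += 1
--             elif d > 0:
--                 if x > y:
--                     break
--                 j += 1
--             else:
--                 if x < y:
--                     break
--                 j += 1
--         i = j + 1
--         if i >= n:
--             break
--     return result
-- ===== Notes on version B (the rewrite author's own statement) =====
-- stated objective: alternative
-- what changed: Replaced the single flat scan that tracks a mode flag and counts direction reversals by an outer do-while over segments with an inner 'extend while monotone' loop; each break position starts the next segment.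
import Mathlib
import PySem

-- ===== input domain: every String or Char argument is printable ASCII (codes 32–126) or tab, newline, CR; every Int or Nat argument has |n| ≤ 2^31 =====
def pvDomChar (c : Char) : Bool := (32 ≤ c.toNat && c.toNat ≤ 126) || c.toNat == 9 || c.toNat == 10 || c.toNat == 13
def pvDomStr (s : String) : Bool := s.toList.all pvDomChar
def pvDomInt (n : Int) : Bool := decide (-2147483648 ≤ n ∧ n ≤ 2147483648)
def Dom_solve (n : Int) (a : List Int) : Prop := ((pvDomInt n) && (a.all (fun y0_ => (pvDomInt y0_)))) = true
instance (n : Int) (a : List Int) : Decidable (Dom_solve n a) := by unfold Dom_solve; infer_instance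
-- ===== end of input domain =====

-- B replaces A's flat mode-tracking scan by an outer do-while over segments with an inner
-- 'extend while monotone' loop; same cost, different decomposition.

-- ===== PORT A =====
-- A's loop body: state (result, mode), index i compares a[i-1] with a[i].
def stepA (a : List Int) (st : Int × Int) (i : Int) : Int × Int :=
  let prev := PySem.List.pyGetD a (i - 1) 0
  let cur := PySem.List.pyGetD a i 0
  if prev < cur then
    if st.2 < 0 then (st.1 + 1, 0) else (st.1, 1)
  else if prev > cur then
    if st.2 > 0 then (st.1 + 1, 0) else (st.1, -1)
  else st

def solve (n : Int) (a : List Int) : Int :=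
  if n = 1 then 1
  else ((PySem.List.pyRange 1 n 1).foldl (stepA a) (1, 0)).1

-- ===== PORT B =====
-- inner 'while j + 1 < n' loop of B: extend the segment while monotone, return break
-- position; fuel = (n - j).toNat only makes the recursion structural (the j + 1 < n guard
-- is reached exactly as in the Python loop).
def innerFuel (n : Int) (a : List Int) : Nat → Int → Int → Int
  | 0, _, j => j
  | fuel + 1, d, j =>
    if j + 1 < n then
      let x := PySem.List.pyGetD a j 0
      let y := PySem.List.pyGetD a (j + 1) 0
      if d = 0 then
        if x < y then innerFuel n a fuel 1 (j + 1)
        else if x > y then innerFuel n a fuel (-1) (j + 1)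
        else innerFuel n a fuel 0 (j + 1)
      else if d > 0 then
        if x > y then j else innerFuel n a fuel d (j + 1)
      else
        if x < y then j else innerFuel n a fuel d (j + 1)
    else j

def innerB (n : Int) (a : List Int) (d j : Int) : Int :=
  innerFuel n a (n - j).toNat d j

-- outer do-while loop of B ('while True: ... if i >= n: break'), with the same
-- structural fuel; fuel 0 coincides with the final pass (i >= n), where the body
-- does not recurse.
def outerFuel (n : Int) (a : List Int) : Nat → Int → Int → Int
  | 0, result, _ => result + 1
  | fuel + 1, result, i =>
    let j := innerB n a 0 i
    if j + 1 < n then outerFuel n a fuel (result + 1) (j + 1) else result + 1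

def outerB (n : Int) (a : List Int) (result i : Int) : Int :=
  outerFuel n a (n - i).toNat result i

def solve_alt (n : Int) (a : List Int) : Int := outerB n a 0 0

-- ===== PRECONDITION & SPEC =====
-- Pre_ excludes exactly the inputs where A raises IndexError: n ≥ 2 with fewer than n elements.
def Pre_solve (n : Int) (a : List Int) : Prop := n ≤ a.length ∨ n ≤ 1
instance (n : Int) (a : List Int) : Decidable (Pre_solve n a) := by unfold Pre_solve; infer_instance
def pvWitness_solve : Int × List Int := (4, [1, 3, 2, 2])

def Spec_solve (n : Int) (a : List Int) (out : Int) : Prop := out = solve_alt n a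
instance (n : Int) (a : List Int) (out : Int) : Decidable (Spec_solve n a out) := by unfold Spec_solve; infer_instance

-- ===== CLAIM (what is proved, stated in full; the proofs are below) =====
def Claim_equal_solve : Prop := ∀ (n : Int) (a : List Int), Dom_solve n a → Pre_solve n a → Spec_solve n a (solve n a)

-- ===== LEMMAS AND PROOFS =====

theorem innerFuel_ge (n : Int) (a : List Int) :
    ∀ (fuel : Nat) (d j : Int), j ≤ innerFuel n a fuel d j := by
  intro fuel
  induction fuel with
  | zero => intro d j; simp [innerFuel]
  | succ f ih =>
    intro d j
    simp only [innerFuel]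
    split
    · split
      · split
        · have := ih 1 (j + 1); omega
        · split
          · have := ih (-1) (j + 1); omega
          · have := ih 0 (j + 1); omega
      · split
        · split
          · omega
          · have := ih d (j + 1); omega
        · split
          · omega
          · have := ih d (j + 1); omega
    · omega

theorem innerB_ge (n : Int) (a : List Int) (d j : Int) : j ≤ innerB n a d j :=
  innerFuel_ge n a _ d j

-- the wrapper satisfies the Python while-loop equation
theorem innerB_unfold (n : Int) (a : List Int) (d j : Int) :
    innerB n a d j =
      if j + 1 < n then
        let x := PySem.List.pyGetD a j 0
        let y := PySem.List.pyGetD a (j + 1) 0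
        if d = 0 then
          if x < y then innerB n a 1 (j + 1)
          else if x > y then innerB n a (-1) (j + 1)
          else innerB n a 0 (j + 1)
        else if d > 0 then
          if x > y then j else innerB n a d (j + 1)
        else
          if x < y then j else innerB n a d (j + 1)
      else j := by
  by_cases h : j + 1 < n
  · unfold innerB
    rw [(by omega : (n - j).toNat = (n - (j + 1)).toNat + 1)]
    simp only [innerFuel, if_pos h]
  · unfold innerB
    rcases (by omega : (n - j).toNat = 0 ∨ (n - j).toNat = 1) with h0 | h0 <;>
      rw [h0] <;> simp [innerFuel, h]

theorem outerFuel_congr (n : Int) (a : List Int) :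
    ∀ (f1 : Nat), ∀ (f2 : Nat) (r i : Int), (n - i).toNat ≤ f1 → (n - i).toNat ≤ f2 →
      outerFuel n a f1 r i = outerFuel n a f2 r i := by
  intro f1
  induction f1 with
  | zero =>
    intro f2 r i h1 h2
    have hi : innerB n a 0 i = i := by rw [innerB_unfold, if_neg (by omega)]
    cases f2 with
    | zero => rfl
    | succ g => simp only [outerFuel, hi]; rw [if_neg (by omega)]
  | succ f ih =>
    intro f2 r i h1 h2
    cases f2 with
    | zero =>
      have hi : innerB n a 0 i = i := by rw [innerB_unfold, if_neg (by omega)]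
      simp only [outerFuel, hi]; rw [if_neg (by omega)]
    | succ g =>
      simp only [outerFuel]
      split
      · have hge := innerB_ge n a 0 i
        rename_i hlt
        exact ih g (r + 1) (innerB n a 0 i + 1) (by omega) (by omega)
      · rfl

theorem outerB_unfold (n : Int) (a : List Int) (r i : Int) :
    outerB n a r i =
      if innerB n a 0 i + 1 < n then outerB n a (r + 1) (innerB n a 0 i + 1)
      else r + 1 := by
  by_cases h : i < n
  · unfold outerB
    rw [(by omega : (n - i).toNat = (n - (i + 1)).toNat + 1)]
    simp only [outerFuel]
    split
    · rename_i hlt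
      have hge := innerB_ge n a 0 i
      exact outerFuel_congr n a _ _ _ _ (by omega) (by omega)
    · rfl
  · have hi : innerB n a 0 i = i := by rw [innerB_unfold, if_neg (by omega)]
    unfold outerB
    rw [(by omega : (n - i).toNat = 0)]
    simp only [outerFuel, hi]
    rw [if_neg (by omega)]

-- Core correspondence: A's fold from index j+1 with mode d and count r equals B's inner
-- loop from position j with direction d (the break position j* starting the next segment).
theorem corr (n : Int) (a : List Int) :
    ∀ (k : Nat) (j d r : Int), (n - j).toNat = k → (d = -1 ∨ d = 0 ∨ d = 1) →
      (if innerB n a d j + 1 < n then outerB n a r (innerB n a d j + 1) else r) =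
        ((PySem.List.pyRange (j + 1) n 1).foldl (stepA a) (r, d)).1 := by
  intro k
  induction k using Nat.strong_induction_on with
  | _ k ih =>
    intro j d r hk hd
    by_cases hjn : j + 1 < n
    · rw [PySem.List.pyRange_one_cons hjn, List.foldl_cons]
      rw [innerB_unfold]
      simp only [if_pos hjn]
      set x := PySem.List.pyGetD a j 0 with hx
      set y := PySem.List.pyGetD a (j + 1) 0 with hy
      have hstep : stepA a (r, d) (j + 1) =
          (if x < y then (if d < 0 then (r + 1, 0) else (r, 1))
           else if x > y then (if d > 0 then (r + 1, 0) else (r, -1)) else (r, d)) := by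
        simp only [stepA, hx, hy]
        have : j + 1 - 1 = j := by omega
        rw [this]
      rcases hd with rfl | rfl | rfl
      · -- d = -1
        rw [if_neg (show ¬ (-1:Int) = 0 by norm_num), if_neg (show ¬ (-1:Int) > 0 by norm_num)]
        by_cases h1 : x < y
        · -- break: A resets, B breaks and the outer loop starts a new segment at j + 1
          rw [if_pos h1, hstep, if_pos h1]
          rw [if_pos (show (-1:Int) < 0 by norm_num)]
          rw [if_pos hjn, outerB_unfold]
          exact ih (n - (j + 1)).toNat (by omega) (j + 1) 0 (r + 1) rfl (by omega)
        · rw [if_neg h1, hstep, if_neg h1]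
          by_cases h2 : x > y
          · rw [if_pos h2, if_neg (show ¬ (-1:Int) > 0 by norm_num)]
            exact ih (n - (j + 1)).toNat (by omega) (j + 1) (-1) r rfl (by omega)
          · rw [if_neg h2]
            exact ih (n - (j + 1)).toNat (by omega) (j + 1) (-1) r rfl (by omega)
      · -- d = 0
        rw [if_pos (show (0:Int) = 0 from rfl), hstep]
        by_cases h1 : x < y
        · rw [if_pos h1, if_pos h1, if_neg (show ¬ (0:Int) < 0 by norm_num)]
          exact ih (n - (j + 1)).toNat (by omega) (j + 1) 1 r rfl (by omega)
        · rw [if_neg h1, if_neg h1]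
          by_cases h2 : x > y
          · rw [if_pos h2, if_pos h2, if_neg (show ¬ (0:Int) > 0 by norm_num)]
            exact ih (n - (j + 1)).toNat (by omega) (j + 1) (-1) r rfl (by omega)
          · rw [if_neg h2, if_neg h2]
            exact ih (n - (j + 1)).toNat (by omega) (j + 1) 0 r rfl (by omega)
      · -- d = 1
        rw [if_neg (show ¬ (1:Int) = 0 by norm_num), if_pos (show (1:Int) > 0 by norm_num)]
        by_cases h2 : x > y
        · rw [if_pos h2, hstep, if_neg (show ¬ x < y by omega), if_pos h2]
          rw [if_pos (show (1:Int) > 0 by norm_num)]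
          rw [if_pos hjn, outerB_unfold]
          exact ih (n - (j + 1)).toNat (by omega) (j + 1) 0 (r + 1) rfl (by omega)
        · rw [if_neg h2, hstep]
          by_cases h1 : x < y
          · rw [if_pos h1, if_neg (show ¬ (1:Int) < 0 by norm_num)]
            exact ih (n - (j + 1)).toNat (by omega) (j + 1) 1 r rfl (by omega)
          · rw [if_neg h1, if_neg h2]
            exact ih (n - (j + 1)).toNat (by omega) (j + 1) 1 r rfl (by omega)
    · rw [innerB_unfold, if_neg hjn]
      rw [if_neg (by omega)]
      rw [PySem.List.pyRange_one, (by omega : (n - (j + 1)).toNat = 0)]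
      simp

theorem main_eq (n : Int) (a : List Int) : solve n a = solve_alt n a := by
  unfold solve solve_alt
  rw [outerB_unfold]
  have h01 : (0:Int) + 1 = 1 := by norm_num
  by_cases h2 : 2 ≤ n
  · rw [if_neg (show ¬ n = 1 by omega)]
    have hc := corr n a (n - 0).toNat 0 0 1 rfl (by norm_num)
    rw [h01] at hc
    exact hc.symm
  · have hi : innerB n a 0 0 = 0 := by rw [innerB_unfold, if_neg (by omega)]
    rw [hi, if_neg (show ¬ (0:Int) + 1 < n by omega), h01]
    by_cases h1 : n = 1
    · rw [if_pos h1]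
    · rw [if_neg h1, PySem.List.pyRange_one, (show (n - 1).toNat = 0 by omega)]
      simp

-- ===== VERDICT (by name: the statement is the Claim_ definition above) =====
theorem solve_spec : Claim_equal_solve := by
  intro n a _ _
  exact main_eq n a
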